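-- pv_equiv track=rewrite | github.com/2226171237/Algorithmpractice | chapter05_string/t5.5.py | isContion
-- ===== SOURCE A (Python) =====
-- def isContion(sa,sb):
--     s1=sa if len(sa)>len(sb) else sb
--     s2=sb if len(sa)>len(sb) else sa
--     hash_s=set()
--     for s in s1:
--         if s not in hash_s:
--             hash_s.add(s)
--     for s in s2:
--         if s not in hash_s:
--             return False
--     return True
-- ===== SOURCE B (Python) =====
-- def isContion(sa, sb):
--     s1 = sa if len(sa) > len(sb) else sb
--     s2 = sb if len(sa) > len(sb) else sa
--     u1 = sorted(set(s1))
--     u2 = sorted(set(s2))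
--
--     def merge_sub(need, have):
--         # both lists strictly increasing; subset test by merge scan
--         if not need:
--             return True
--         if not have:
--             return False
--         if have[0] < need[0]:
--             return merge_sub(need, have[1:])
--         if have[0] == need[0]:
--             return merge_sub(need[1:], have[1:])
--         return False
--
--     return merge_sub(u2, u1)
-- ===== Notes on version B (the rewrite author's own statement) =====
-- stated objective: alternative
-- what changed: Replaces A's hash-set build-then-probe with a sort-and-merge subset test: B sorts the unique characters of both strings and runs a two-pointer merge scan, so no membership lookup of any kind remains.
import Mathlib
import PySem

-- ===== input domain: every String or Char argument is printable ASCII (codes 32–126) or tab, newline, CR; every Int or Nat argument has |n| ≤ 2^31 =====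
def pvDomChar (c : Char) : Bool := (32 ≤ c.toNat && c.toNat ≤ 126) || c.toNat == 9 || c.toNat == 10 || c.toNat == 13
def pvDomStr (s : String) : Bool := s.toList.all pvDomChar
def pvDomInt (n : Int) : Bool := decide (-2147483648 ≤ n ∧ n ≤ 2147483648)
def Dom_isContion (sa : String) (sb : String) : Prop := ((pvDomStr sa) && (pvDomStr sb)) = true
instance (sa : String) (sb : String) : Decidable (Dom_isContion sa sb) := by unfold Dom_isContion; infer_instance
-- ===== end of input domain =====

-- B replaces A's hash-set build-then-probe by a sort-and-merge subset test
-- over the sorted unique characters of each string (alternative algorithm).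

-- ===== PORT A =====
-- second loop of A: 'for s in s2: if s not in hash_s: return False' / 'return True'
def isContionCheck (hashS : PySem.Set Char) : List Char → Bool
  | [] => true
  | s :: rest => if hashS.contains s then isContionCheck hashS rest else false

def isContion (sa : String) (sb : String) : Bool :=
  let s1 := if sa.length > sb.length then sa else sb
  let s2 := if sa.length > sb.length then sb else sa
  let hashS := s1.toList.foldl
    (fun h s => if h.contains s then h else PySem.Set.add h s) PySem.Set.empty
  isContionCheck hashS s2.toList

-- ===== PORT B =====
-- 'merge_sub(need, have)': merge scan of two strictly increasing char lists
def mergeSub : List Char → List Char → Bool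
  | [], _ => true
  | _ :: _, [] => false
  | c :: cs, d :: ds =>
    if d < c then mergeSub (c :: cs) ds
    else if d = c then mergeSub cs ds
    else false
termination_by u v => u.length + v.length
decreasing_by all_goals (simp only [List.length_cons]; omega)

def isContion_alt (sa : String) (sb : String) : Bool :=
  let s1 := if sa.length > sb.length then sa else sb
  let s2 := if sa.length > sb.length then sb else sa
  let u1 := PySem.List.sorted (PySem.Set.ofList s1.toList) (fun x => x) false
  let u2 := PySem.List.sorted (PySem.Set.ofList s2.toList) (fun x => x) false
  mergeSub u2 u1

-- ===== PRECONDITION & SPEC =====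
def Spec_isContion (sa : String) (sb : String) (out : Bool) : Prop := out = isContion_alt sa sb
instance (sa : String) (sb : String) (out : Bool) : Decidable (Spec_isContion sa sb out) := by unfold Spec_isContion; infer_instance

-- ===== CLAIM (what is proved, stated in full; the proofs are below) =====
def Claim_equal_isContion : Prop := ∀ (sa : String) (sb : String), Dom_isContion sa sb → Spec_isContion sa sb (isContion sa sb)

-- ===== LEMMAS AND PROOFS =====

-- A's build loop is exactly Set.ofList (the explicit membership test is Set.add's own test)
theorem build_eq_ofList (l : List Char) :
    l.foldl (fun h s => if h.contains s then h else PySem.Set.add h s) PySem.Set.empty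
      = PySem.Set.ofList l := by
  rw [PySem.Set.ofList_eq_foldl]
  apply PySem.List.foldl_congr_mem
  intro h s _
  by_cases hm : s ∈ h
  · simp [PySem.Set.add, hm]
  · simp [hm]

-- A's second loop decides membership of every char of l in the set
theorem check_eq_decide (hs : PySem.Set Char) (l : List Char) :
    isContionCheck hs l = decide (∀ c ∈ l, c ∈ hs) := by
  induction l with
  | nil => simp [isContionCheck]
  | cons c rest ih =>
    by_cases hm : c ∈ hs
    · simp [isContionCheck, hm, ih]
    · simp [isContionCheck, hm]

-- the merge scan on strictly increasing lists decides the subset relation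
theorem mergeSub_eq (u2 u1 : List Char)
    (h2 : u2.Pairwise (· < ·)) (h1 : u1.Pairwise (· < ·)) :
    mergeSub u2 u1 = decide (∀ c ∈ u2, c ∈ u1) := by
  fun_induction mergeSub u2 u1 with
  | case1 u1 => simp
  | case2 c cs =>
    have h : ¬(∀ x ∈ c :: cs, x ∈ ([] : List Char)) :=
      fun h => absurd (h c List.mem_cons_self) List.not_mem_nil
    exact (decide_eq_false h).symm
  | case3 c cs d ds hdc ih =>
    rw [List.pairwise_cons] at h1
    rw [ih h2 h1.2]
    have hne : ∀ x ∈ c :: cs, x ≠ d := by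
      intro x hx
      rcases List.mem_cons.mp hx with rfl | hx
      · exact fun h => absurd (h ▸ hdc) (lt_irrefl _)
      · rw [List.pairwise_cons] at h2
        exact fun h => absurd (h ▸ (hdc.trans (h2.1 x hx))) (lt_irrefl _)
    simp only [decide_eq_decide]
    constructor
    · intro h x hx
      exact List.mem_cons_of_mem _ (h x hx)
    · intro h x hx
      rcases List.mem_cons.mp (h x hx) with h' | h'
      · exact absurd h' (hne x hx)
      · exact h'
  | case4 cs d ds hdd ih =>
    rw [List.pairwise_cons] at h1
    rw [List.pairwise_cons] at h2
    rw [ih h2.2 h1.2]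
    simp only [decide_eq_decide]
    constructor
    · intro h x hx
      rcases List.mem_cons.mp hx with rfl | hx
      · exact List.mem_cons_self
      · exact List.mem_cons_of_mem _ (h x hx)
    · intro h x hx
      rcases List.mem_cons.mp (h x (List.mem_cons_of_mem _ hx)) with h' | h'
      · exact absurd (h' ▸ (h2.1 x hx)) (lt_irrefl _)
      · exact h'
  | case5 c cs d ds hdc hne =>
    have hcd : c < d := lt_of_le_of_ne (not_lt.mp hdc) (fun h => hne h.symm)
    rw [List.pairwise_cons] at h1
    have hno : ¬(∀ x ∈ c :: cs, x ∈ d :: ds) := by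
      intro h
      rcases List.mem_cons.mp (h c List.mem_cons_self) with rfl | hm
      · exact absurd hcd (lt_irrefl _)
      · exact absurd (hcd.trans (h1.1 c hm)) (lt_irrefl _)
    exact (decide_eq_false hno).symm

-- the sorted unique list of a string's chars is strictly increasing
theorem sorted_ofList_pairwise (l : List Char) :
    (PySem.List.sorted (PySem.Set.ofList l) (fun x => x) false).Pairwise (· < ·) := by
  have hle := PySem.List.sorted_pairwise (xs := PySem.Set.ofList l) (key := fun x => x)
  have hnd : (PySem.List.sorted (PySem.Set.ofList l) (fun x => x) false).Nodup :=
    (PySem.List.sorted_perm (xs := PySem.Set.ofList l) (key := fun x => x)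
      (rev := false)).nodup_iff.mpr (PySem.Set.nodup_ofList l)
  exact (hle.and hnd).imp (fun h => lt_of_le_of_ne h.1 h.2)

-- B's merge scan on the two sorted unique lists decides the plain subset relation
theorem merge_sorted_eq (l2 l1 : List Char) :
    mergeSub (PySem.List.sorted (PySem.Set.ofList l2) (fun x => x) false)
             (PySem.List.sorted (PySem.Set.ofList l1) (fun x => x) false)
      = decide (∀ c ∈ l2, c ∈ l1) := by
  rw [mergeSub_eq _ _ (sorted_ofList_pairwise _) (sorted_ofList_pairwise _)]
  simp only [PySem.List.mem_sorted, PySem.Set.mem_ofList]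

-- ===== VERDICT (by name: the statement is the Claim_ definition above) =====
theorem isContion_spec : Claim_equal_isContion := by
  intro sa sb _
  unfold Spec_isContion isContion isContion_alt
  simp only [build_eq_ofList, check_eq_decide, merge_sorted_eq, PySem.Set.mem_ofList]
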